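-- pv_equiv track=rewrite | github.com/aume/BFsegmenter | segmenter.py | foregroundClustering
-- ===== SOURCE A (Python) =====
-- def foregroundClustering(processed, k_depth = 3):
--     start = 0
--     while start < len(processed):
--         # If we have a fg
--         if processed[start]['type'] == 'fore':
--             log_a = log_b =start
--             # Go through k deep and save the idx of furthest fg within k
--             for i in range(start+1, start+k_depth+1, 1):
--                 if i < len(processed):
--                     categ = processed[i]['type']
--                     if categ == 'fore':
--                         log_b = i
--             # now we overwrite the types between the two detected foregrounds if we found one
--             if log_b - log_a > 0:
--                 for j in range(log_a, log_b+1,1):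
--                         processed[j]['type'] = 'fore'
--                 start = log_b
--             # we didnt find a fg withing the k window
--             # continue and skip remeinder of the window since theres no fg within it
--             else:
--                 start += k_depth
--         # not fg, move to next element
--         else:
--             start += 1
--     return processed
-- ===== SOURCE B (Python) =====
-- def foregroundClustering(processed, k_depth=3):
--     # two-pass: collect foreground indices, then bridge consecutive ones within k_depth
--     idxs = [i for i, d in enumerate(processed) if d['type'] == 'fore']
--     for p, q in zip(idxs, idxs[1:]):
--         if q - p <= k_depth:
--             for j in range(p, q + 1):
--                 processed[j]['type'] = 'fore'
--     return processed
-- ===== Notes on version B (the rewrite author's own statement) =====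
-- stated objective: simpler
-- what changed: Replaces the while-loop with look-ahead window, furthest-match jump and window-skip control flow by a two-pass shape: collect all foreground indices once, then bridge each consecutive pair whose gap is at most k_depth.
import Mathlib
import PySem

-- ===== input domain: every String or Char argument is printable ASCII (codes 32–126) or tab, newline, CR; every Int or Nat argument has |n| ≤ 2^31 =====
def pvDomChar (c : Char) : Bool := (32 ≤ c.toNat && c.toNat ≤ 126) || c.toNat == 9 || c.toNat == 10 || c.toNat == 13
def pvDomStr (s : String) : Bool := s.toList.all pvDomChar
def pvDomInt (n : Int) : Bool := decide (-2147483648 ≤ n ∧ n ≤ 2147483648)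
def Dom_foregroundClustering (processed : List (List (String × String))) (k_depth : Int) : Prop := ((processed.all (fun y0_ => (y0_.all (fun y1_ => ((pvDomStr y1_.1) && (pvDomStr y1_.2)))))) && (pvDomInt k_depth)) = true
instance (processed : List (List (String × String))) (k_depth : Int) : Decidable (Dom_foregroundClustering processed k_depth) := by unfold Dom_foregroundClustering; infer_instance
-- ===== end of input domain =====

-- B replaces A's look-ahead-window-and-jump while-loop by a two-pass shape (collect
-- foreground indices, then bridge consecutive pairs within k_depth); equivalence is about
-- the returned value (both Pythons also mutate the dicts of `processed` in place alike).

-- ===== PORT A =====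
-- d['type'] read: first-match lookup in the association list (= Python dict lookup)
def pvTy (ps : List (List (String × String))) (i : Int) : Option String :=
  (PySem.List.pyGet? ps i).bind (fun d => (PySem.Dict.mk d).get? "type")

-- processed[j]['type'] = 'fore' (overwrite in place; j is in range whenever Python reaches
-- this statement on an input of Pre_, so the guard only makes the port total)
def pvSetFore (ps : List (List (String × String))) (j : Int) : List (List (String × String)) :=
  if 0 ≤ j then ps.modify j.toNat (fun d => ((PySem.Dict.mk d).insert "type" "fore").items) else ps

-- the while-loop; fuel = one unit per executed iteration (on Pre_, `start` grows by ≥ 1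
-- each iteration, so `length + 1` units are never exhausted)
def pvLoopA (k : Int) : Nat → List (List (String × String)) → Int → List (List (String × String))
  | 0, ps, _ => ps
  | fuel + 1, ps, start =>
    if start < (ps.length : Int) then
      if pvTy ps start = some "fore" then
        -- log_a = log_b = start; for i in range(start+1, start+k_depth+1): …
        let log_b := (PySem.List.pyRange (start + 1) (start + k + 1) 1).foldl
          (fun lb i => if i < (ps.length : Int) then
              (if pvTy ps i = some "fore" then i else lb) else lb) start
        if log_b - start > 0 then
          pvLoopA k fuel ((PySem.List.pyRange start (log_b + 1) 1).foldl (fun p j => pvSetFore p j) ps) log_b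
        else
          pvLoopA k fuel ps (start + k)
      else pvLoopA k fuel ps (start + 1)
    else ps

def foregroundClustering (processed : List (List (String × String))) (k_depth : Int) : List (List (String × String)) :=
  pvLoopA k_depth (processed.length + 1) processed 0

-- ===== PORT B =====
def foregroundClustering_alt (processed : List (List (String × String))) (k_depth : Int) : List (List (String × String)) :=
  let idxs := ((PySem.List.enumerate processed).filter
    (fun p => (PySem.Dict.mk p.2).get? "type" == some "fore")).map (·.1)
  (idxs.zip idxs.tail).foldl
    (fun ps pq =>
      if pq.2 - pq.1 ≤ k_depth then
        (PySem.List.pyRange pq.1 (pq.2 + 1) 1).foldl (fun a j => pvSetFore a j) ps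
      else ps)
    processed

-- ===== PRECONDITION & SPEC =====
-- Pre_ excludes exactly the inputs on which Python A does not return normally: a dict
-- without a 'type' key (KeyError), and k_depth ≤ 0 while some segment is foreground
-- (the while-loop then never advances past the first foreground: it loops forever, or
-- crashes by negative indexing).  It also excludes duplicate-key association lists,
-- which do not correspond to any Python dict.
def Pre_foregroundClustering (processed : List (List (String × String))) (k_depth : Int) : Prop :=
  (∀ d ∈ processed, (d.map Prod.fst).Nodup ∧ "type" ∈ d.map Prod.fst) ∧
  (1 ≤ k_depth ∨ ∀ d ∈ processed, (PySem.Dict.mk d).get? "type" ≠ some "fore")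
instance (processed : List (List (String × String))) (k_depth : Int) : Decidable (Pre_foregroundClustering processed k_depth) := by unfold Pre_foregroundClustering; infer_instance

def pvWitness_foregroundClustering : (List (List (String × String))) × Int :=
  ([[("type", "fore")], [("type", "back")], [("type", "fore")], [("type", "back")]], 2)

def Spec_foregroundClustering (processed : List (List (String × String))) (k_depth : Int) (out : List (List (String × String))) : Prop := out = foregroundClustering_alt processed k_depth
instance (processed : List (List (String × String))) (k_depth : Int) (out : List (List (String × String))) : Decidable (Spec_foregroundClustering processed k_depth out) := by unfold Spec_foregroundClustering; infer_instance

-- ===== CLAIM (what is proved, stated in full; the proofs are below) =====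
def Claim_equal_foregroundClustering : Prop := ∀ (processed : List (List (String × String))) (k_depth : Int), Dom_foregroundClustering processed k_depth → Pre_foregroundClustering processed k_depth → Spec_foregroundClustering processed k_depth (foregroundClustering processed k_depth)

-- ===== LEMMAS AND PROOFS =====

-- `setF d` = the dict d with d['type'] = 'fore'
def setF (d : List (String × String)) : List (String × String) :=
  ((PySem.Dict.mk d).insert "type" "fore").items

-- pointwise form of A's fill loop: set 'type' = 'fore' at every index in [a, b]
def mark (a b : Int) (ps : List (List (String × String))) : List (List (String × String)) :=
  ps.mapIdx (fun i d => if a ≤ (i : Int) ∧ (i : Int) ≤ b then setF d else d)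

-- B's pair loop, recursively over the index list
def bridgeRec (k : Int) : List Int → List (List (String × String)) → List (List (String × String))
  | [], ps => ps
  | [_], ps => ps
  | p :: q :: rest, ps => bridgeRec k (q :: rest) (if q - p ≤ k then mark p q ps else ps)

-- is the entry at index j a foreground?
def foreAt (ps : List (List (String × String))) (j : Int) : Bool :=
  (PySem.Dict.mk (PySem.List.pyGetD ps j [])).get? "type" == some "fore"

-- the foreground indices ≥ s
def G (ps : List (List (String × String))) (s : Int) : List Int :=
  (PySem.List.pyRange 0 (ps.length : Int) 1).filter (fun j => decide (s ≤ j) && foreAt ps j)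

theorem setF_setF (d : List (String × String)) : setF (setF d) = setF d := by
  simp [setF]
  have : PySem.Dict.mk ((PySem.Dict.mk d).insert "type" "fore").items
      = (PySem.Dict.mk d).insert "type" "fore" := rfl
  rw [this, PySem.Dict.insert_insert_self]

theorem length_mark (a b : Int) (ps : List (List (String × String))) :
    (mark a b ps).length = ps.length := by simp [mark]

theorem getElem_mark (a b : Int) (ps : List (List (String × String))) (i : Nat)
    (h : i < (mark a b ps).length) :
    (mark a b ps)[i] = if a ≤ (i : Int) ∧ (i : Int) ≤ b then setF (ps[i]'(by simpa [length_mark] using h)) else (ps[i]'(by simpa [length_mark] using h)) := by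
  simp [mark, List.getElem_mapIdx]

theorem mark_mark (a r b : Int) (ps : List (List (String × String)))
    (h1 : a ≤ r) (h2 : r ≤ b) : mark r b (mark a r ps) = mark a b ps := by
  apply List.ext_getElem
  · simp [length_mark]
  · intro i h h'
    rw [getElem_mark, getElem_mark, getElem_mark]
    split_ifs with c1 c2 c2 <;> first
      | rfl
      | (exact setF_setF _)
      | omega

theorem mark_empty (a b : Int) (ps : List (List (String × String))) (h : b < a) :
    mark a b ps = ps := by
  apply List.ext_getElem
  · simp [length_mark]
  · intro i h1 h2
    rw [getElem_mark]
    rw [if_neg (by omega)]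

theorem foreAt_mark (a b j : Int) (ps : List (List (String × String)))
    (h0 : 0 ≤ j) (h1 : j < (ps.length : Int)) :
    foreAt (mark a b ps) j = if a ≤ j ∧ j ≤ b then true else foreAt ps j := by
  have hlen : j < ((mark a b ps).length : Int) := by rwa [length_mark]
  rw [foreAt, PySem.List.pyGetD_eq_getElem _ _ h0 hlen, getElem_mark]
  have hj : ((j.toNat : Int)) = j := Int.toNat_of_nonneg h0
  rw [hj]
  split_ifs with c
  · have : PySem.Dict.mk (setF (ps[j.toNat]'(by omega))) =
        (PySem.Dict.mk (ps[j.toNat]'(by omega))).insert "type" "fore" := rfl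
    simp [this, PySem.Dict.get?_insert_self]
  · rw [foreAt, PySem.List.pyGetD_eq_getElem _ _ h0 h1]

-- A's in-place assignment on top of a partial mark extends the mark by one index
theorem setFore_mark (a b : Int) (ps : List (List (String × String)))
    (h0 : 0 ≤ a) (hab : a ≤ b) :
    pvSetFore (mark a (b - 1) ps) b = mark a b ps := by
  have hb : (0:Int) ≤ b := le_trans h0 hab
  rw [pvSetFore, if_pos hb]
  apply List.ext_getElem
  · simp [length_mark]
  · intro i h1 h2
    rw [List.getElem_modify, getElem_mark]
    by_cases hc : b.toNat = i
    · rw [if_pos hc]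
      have hbi : (i : Int) = b := by omega
      rw [getElem_mark]
      rw [if_neg (by omega), if_pos (by omega)]
      rfl
    · rw [if_neg hc, getElem_mark]
      split_ifs with c1 c2 c2 <;> first | rfl | omega

-- the fill loop 'for j in range(a, b+1): processed[j]["type"] = "fore"' is `mark a b`
theorem fill_eq_mark (a : Int) (ps : List (List (String × String))) (h0 : 0 ≤ a) :
    ∀ (b : Int), (PySem.List.pyRange a (b + 1) 1).foldl (fun p j => pvSetFore p j) ps = mark a b ps := by
  intro b
  by_cases hab : b < a
  · rw [PySem.List.pyRange_one_eq_nil (by omega), List.foldl_nil, mark_empty _ _ _ hab]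
  · push Not at hab
    induction hd : (b - a).toNat generalizing b with
    | zero =>
      have hba : b = a := by omega
      subst hba
      rw [PySem.List.pyRange_one_succ_right (le_refl _), PySem.List.pyRange_one_eq_nil (le_refl _)]
      simp only [List.nil_append, List.foldl_cons, List.foldl_nil]
      have := setFore_mark b b ps h0 (le_refl _)
      rw [← this, mark_empty _ _ _ (by omega)]
    | succ m ih =>
      rw [PySem.List.pyRange_one_succ_right (by omega), List.foldl_append]
      simp only [List.foldl_cons, List.foldl_nil]
      have e := ih (b - 1) (by omega) (by omega)
      rw [show b - 1 + 1 = b from by omega] at e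
      rw [e]
      exact setFore_mark a b ps h0 (by omega)

-- two sorted integer lists with the same members are equal
theorem sorted_ext (l₁ l₂ : List Int) (h₁ : List.Pairwise (· < ·) l₁)
    (h₂ : List.Pairwise (· < ·) l₂) (hm : ∀ x, x ∈ l₁ ↔ x ∈ l₂) : l₁ = l₂ := by
  have hp : l₁.Perm l₂ :=
    (List.perm_ext_iff_of_nodup (h₁.imp ne_of_lt) (h₂.imp ne_of_lt)).2 hm
  exact List.Perm.eq_of_pairwise (le := (· < ·)) (fun a b _ _ hab hba => by omega) h₁ h₂ hp

theorem G_sorted (ps : List (List (String × String))) (s : Int) :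
    List.Pairwise (· < ·) (G ps s) :=
  (PySem.List.pairwise_lt_pyRange_one 0 _).filter _

theorem mem_G (ps : List (List (String × String))) (s j : Int) :
    j ∈ G ps s ↔ (0 ≤ j ∧ j < (ps.length : Int)) ∧ s ≤ j ∧ foreAt ps j = true := by
  simp [G, List.mem_filter, PySem.List.mem_pyRange_one]

theorem pvTy_eq_foreAt (ps : List (List (String × String))) (i : Int)
    (h0 : 0 ≤ i) (h1 : i < (ps.length : Int)) :
    (pvTy ps i = some "fore") ↔ foreAt ps i = true := by
  rw [pvTy, foreAt, PySem.List.pyGetD_eq_getElem _ _ h0 h1]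
  have hg : PySem.List.pyGet? ps i = some (ps[i.toNat]'(by omega)) :=
    PySem.List.pyGet?_eq_some_getElem ps h0 (by simpa using h1)
  rw [hg]
  simp

-- the general shape of A's window scan: keep the last element satisfying P
theorem foldl_lastP (P : Int → Bool) : ∀ (l : List Int) (acc : Int),
    l.foldl (fun lb i => if P i then i else lb) acc = (l.filter P).getLastD acc := by
  intro l
  induction l with
  | nil => intro acc; rfl
  | cons x xs ih =>
    intro acc
    rw [List.foldl_cons, List.filter_cons]
    by_cases h : P x
    · rw [if_pos h, if_pos h, ih, List.getLastD_cons]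
    · rw [if_neg h, if_neg (by simpa using h), ih]

-- a sorted list splits at a threshold into its lower and upper parts
theorem sorted_split (c : Int) : ∀ (l : List Int), List.Pairwise (· < ·) l →
    l = l.filter (fun x => decide (x ≤ c)) ++ l.filter (fun x => decide (c < x)) := by
  intro l
  induction l with
  | nil => intro _; rfl
  | cons x xs ih =>
    intro h
    rw [List.filter_cons, List.filter_cons]
    by_cases hx : x ≤ c
    · rw [if_pos (by simpa using hx), if_neg (by simp; omega)]
      rw [List.cons_append]
      congr 1
      exact ih h.of_cons
    · rw [if_neg (by simpa using hx), if_pos (by simp; omega)]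
      have h1 : xs.filter (fun x => decide (x ≤ c)) = [] := by
        rw [List.filter_eq_nil_iff]
        intro y hy
        have := List.rel_of_pairwise_cons h hy
        simp; omega
      have h2 : xs.filter (fun x => decide (c < x)) = xs := by
        rw [List.filter_eq_self]
        intro y hy
        have := List.rel_of_pairwise_cons h hy
        simp; omega
      rw [h1, h2, List.nil_append]

theorem getLastD_append_singleton : ∀ (l : List Int) (a d : Int), (l ++ [a]).getLastD d = a := by
  intro l
  induction l with
  | nil => intro a d; rfl
  | cons x xs ih => intro a d; rw [List.cons_append, List.getLastD_cons, ih]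

theorem le_getLast_of_pairwise : ∀ (l : List Int) (a : Int) (x : Int), x ∈ l ++ [a] →
    List.Pairwise (· < ·) (l ++ [a]) → x ≤ a := by
  intro l a x hx hp
  rcases List.mem_append.1 hx with h | h
  · have := (List.pairwise_append.1 hp).2.2 x h a (List.mem_singleton_self a)
    omega
  · simp at h; omega

-- B's program, phrased with `bridgeRec`/`mark`
theorem alt_eq (ps : List (List (String × String))) (k : Int) :
    foregroundClustering_alt ps k = bridgeRec k (G ps 0) ps := by
  have hidx : ((PySem.List.enumerate ps).filter
      (fun p => (PySem.Dict.mk p.2).get? "type" == some "fore")).map (·.1) = G ps 0 := by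
    rw [PySem.List.enumerate_eq_map_pyRange ps [], List.filter_map, List.map_map]
    have h1 : ∀ x ∈ (PySem.List.pyRange 0 (PySem.List.len ps) 1).filter
        ((fun p => (PySem.Dict.mk p.2).get? "type" == some "fore") ∘
          (fun j => (j, PySem.List.pyGetD ps j []))), ((·.1) ∘ (fun j => (j, PySem.List.pyGetD ps j []))) x = id x := by
      intro x _; rfl
    rw [List.map_congr_left h1, List.map_id, G]
    apply List.filter_congr
    intro x hx
    have h0x : 0 ≤ x := (PySem.List.mem_pyRange_one.1 (by simpa using hx)).1
    simp [foreAt, h0x]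
  have hzip : ∀ (l : List Int) (qs : List (List (String × String))), (∀ x ∈ l, 0 ≤ x) →
      (l.zip l.tail).foldl
        (fun ps pq => if pq.2 - pq.1 ≤ k then
            (PySem.List.pyRange pq.1 (pq.2 + 1) 1).foldl (fun a j => pvSetFore a j) ps
          else ps) qs = bridgeRec k l qs := by
    intro l
    induction l with
    | nil => intro qs _; rfl
    | cons p tl ih =>
      intro qs hnn
      cases tl with
      | nil => rfl
      | cons q rest =>
        show (((p, q) :: (q :: rest).zip rest).foldl _ qs) = _
        rw [List.foldl_cons]
        have hrw : (q :: rest).zip rest = (q :: rest).zip (q :: rest).tail := rfl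
        rw [hrw, ih _ (fun x hx => hnn x (List.mem_cons_of_mem _ hx))]
        show bridgeRec k (q :: rest) (if q - p ≤ k then _ else qs) = bridgeRec k (p :: q :: rest) qs
        by_cases hqp : q - p ≤ k
        · rw [if_pos hqp, fill_eq_mark p qs (hnn p (List.mem_cons_self)) q]
          show _ = bridgeRec k (q :: rest) (if q - p ≤ k then mark p q qs else qs)
          rw [if_pos hqp]
        · rw [if_neg hqp]
          show _ = bridgeRec k (q :: rest) (if q - p ≤ k then mark p q qs else qs)
          rw [if_neg hqp]
  rw [foregroundClustering_alt, hidx]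
  exact hzip (G ps 0) ps (fun x hx => ((mem_G ps 0 x).1 hx).1.1)

theorem foreAt_false_of_nofore (ps : List (List (String × String)))
    (h : ∀ d ∈ ps, (PySem.Dict.mk d).get? "type" ≠ some "fore") (j : Int) :
    foreAt ps j = false := by
  by_cases hr : PySem.Raise.InRange ps.length j
  · have hm : PySem.List.pyGetD ps j [] ∈ ps := PySem.List.pyGetD_mem ps [] hr
    rw [foreAt]
    simpa using h _ hm
  · rw [foreAt]
    have : PySem.List.pyGet? ps j = none := (PySem.List.pyGet?_eq_none_iff ps j).2 hr
    rw [PySem.List.pyGetD, this]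
    rfl

theorem pvTy_ne_of_nofore (ps : List (List (String × String)))
    (h : ∀ d ∈ ps, (PySem.Dict.mk d).get? "type" ≠ some "fore") (j : Int) :
    pvTy ps j ≠ some "fore" := by
  rw [pvTy]
  cases hg : PySem.List.pyGet? ps j with
  | none => simp
  | some d =>
    have hd : d ∈ ps := PySem.List.mem_of_pyGet?_eq_some ps hg
    simpa using h d hd

theorem loopA_nofore (k : Int) (ps : List (List (String × String)))
    (h : ∀ d ∈ ps, (PySem.Dict.mk d).get? "type" ≠ some "fore") :
    ∀ (fuel : Nat) (s : Int), (ps.length : Int) - s ≤ (fuel : Int) →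
      pvLoopA k fuel ps s = ps := by
  intro fuel
  induction fuel with
  | zero => intro s _; rfl
  | succ fuel ih =>
    intro s hf
    show (if s < (ps.length : Int) then _ else ps) = ps
    by_cases hsn : s < (ps.length : Int)
    · rw [if_pos hsn, if_neg (pvTy_ne_of_nofore ps h s)]
      exact ih (s + 1) (by push_cast at hf ⊢; omega)
    · rw [if_neg hsn]

theorem bridge_chain (k s L : Int) (Z : List Int) (hLk : L ≤ s + k) :
    ∀ (u : List Int) (a : Int) (ps : List (List (String × String))),
      s ≤ a → a < L → (∀ x ∈ u, a < x ∧ x < L) → List.Pairwise (· < ·) u →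
      bridgeRec k (a :: (u ++ L :: Z)) ps = bridgeRec k (L :: Z) (mark a L ps) := by
  intro u
  induction u with
  | nil =>
    intro a ps h1 h2 _ _
    show bridgeRec k (L :: Z) (if L - a ≤ k then mark a L ps else ps) = _
    rw [if_pos (by omega)]
  | cons r u' ih =>
    intro a ps h1 h2 hu hp
    have hr := hu r (List.mem_cons_self)
    show bridgeRec k (r :: (u' ++ L :: Z)) (if r - a ≤ k then mark a r ps else ps) = _
    rw [if_pos (by omega)]
    rw [ih r (mark a r ps) (by omega) hr.2
      (fun x hx => ⟨List.rel_of_pairwise_cons hp hx, (hu x (List.mem_cons_of_mem _ hx)).2⟩)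
      hp.of_cons]
    rw [mark_mark a r L ps (by omega) (by omega)]

theorem pvLoopA_eq_bridgeRec (k : Int) (hk : 1 ≤ k) :
    ∀ (fuel : Nat) (ps : List (List (String × String))) (s : Int), 0 ≤ s →
      (ps.length : Int) - s ≤ (fuel : Int) →
      pvLoopA k fuel ps s = bridgeRec k (G ps s) ps := by
  intro fuel
  induction fuel with
  | zero =>
    intro ps s hs hf
    have hG : G ps s = [] := by
      rw [List.eq_nil_iff_forall_not_mem]
      intro x hx
      rw [mem_G] at hx
      push_cast at hf
      omega
    rw [hG]
    rfl
  | succ fuel ih =>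
    intro ps s hs hf
    by_cases hsn : s < (ps.length : Int)
    case neg =>
      have hG : G ps s = [] := by
        rw [List.eq_nil_iff_forall_not_mem]
        intro x hx
        rw [mem_G] at hx
        omega
      rw [hG]
      show (if s < (ps.length : Int) then _ else ps) = ps
      rw [if_neg hsn]
    case pos =>
    show (if s < (ps.length : Int) then _ else ps) = _
    rw [if_pos hsn]
    by_cases hfore : pvTy ps s = some "fore"
    case neg =>
      rw [if_neg hfore]
      have hGeq : G ps s = G ps (s + 1) := by
        apply List.filter_congr
        intro x hx
        have hx0 := PySem.List.mem_pyRange_one.1 (by simpa using hx)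
        by_cases hxs : x = s
        · subst hxs
          have : foreAt ps x = false := by
            rcases Bool.eq_false_or_eq_true (foreAt ps x) with h | h
            · exact absurd ((pvTy_eq_foreAt ps x hs hsn).2 h) hfore
            · exact h
          simp [this]
        · have : (s ≤ x) ↔ (s + 1 ≤ x) := by omega
          simp [this]
      rw [hGeq, ih ps (s + 1) (by omega) (by push_cast at hf ⊢; omega)]
    case pos =>
    rw [if_pos hfore]
    have hfA : foreAt ps s = true := (pvTy_eq_foreAt ps s hs hsn).1 hfore
    set n : Int := (ps.length : Int) with hn
    set P : Int → Bool := fun i => decide (i < n) && foreAt ps i with hP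
    set Y : List Int := G ps (s + 1) with hY
    set X : List Int := (PySem.List.pyRange (s + 1) (s + k + 1) 1).filter P with hXdef
    have hfold : (PySem.List.pyRange (s + 1) (s + k + 1) 1).foldl
        (fun lb i => if i < n then (if pvTy ps i = some "fore" then i else lb) else lb) s
        = X.getLastD s := by
      rw [PySem.List.foldl_congr_mem _ _ (fun lb i => if P i then i else lb) _ ?hcong]
      · exact foldl_lastP P _ s
      case hcong =>
        intro acc x hx
        have hx1 : s + 1 ≤ x := (PySem.List.mem_pyRange_one.1 hx).1
        by_cases hxn : x < n
        · rw [if_pos hxn]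
          have hiff := pvTy_eq_foreAt ps x (by omega) hxn
          by_cases hfx : foreAt ps x = true
          · rw [if_pos (hiff.2 hfx), hP]
            simp [hxn, hfx]
          · rw [if_neg (fun hc => hfx (hiff.1 hc)), hP]
            simp [hxn, Bool.eq_false_iff.2 hfx]
        · rw [if_neg hxn, hP]
          simp [hxn]
    have hGs : G ps s = s :: Y := by
      apply sorted_ext _ _ (G_sorted ps s)
      · apply List.Pairwise.cons
        · intro y hy
          have := (mem_G ps (s + 1) y).1 hy
          omega
        · exact G_sorted ps (s + 1)
      · intro x
        rw [mem_G, List.mem_cons, hY, mem_G]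
        constructor
        · rintro ⟨h1, h2, h3⟩
          by_cases hxs : x = s
          · exact Or.inl hxs
          · exact Or.inr ⟨h1, by omega, h3⟩
        · rintro (rfl | ⟨h1, h2, h3⟩)
          · exact ⟨⟨hs, hsn⟩, le_refl _, hfA⟩
          · exact ⟨h1, by omega, h3⟩
    have hmemX : ∀ x, x ∈ X ↔ x ∈ Y ∧ x ≤ s + k := by
      intro x
      rw [hXdef, List.mem_filter, hY, mem_G, hP]
      simp only [PySem.List.mem_pyRange_one, Bool.and_eq_true, decide_eq_true_eq]
      constructor
      · rintro ⟨⟨h1, h2⟩, h3, h4⟩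
        exact ⟨⟨⟨by omega, h3⟩, h1, h4⟩, by omega⟩
      · rintro ⟨⟨⟨h1, h2⟩, h3, h4⟩, h5⟩
        exact ⟨⟨h3, by omega⟩, h2, h4⟩
    rw [hfold]
    by_cases hXnil : X = []
    case pos =>
      rw [hXnil]
      show (if s - s > 0 then _ else pvLoopA k fuel ps (s + k)) = _
      rw [if_neg (by omega)]
      have hYk : G ps (s + k) = Y := by
        apply sorted_ext _ _ (G_sorted ps (s + k)) (G_sorted ps (s + 1))
        intro x
        rw [mem_G, mem_G]
        constructor
        · rintro ⟨h1, h2, h3⟩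
          exact ⟨h1, by omega, h3⟩
        · rintro ⟨h1, h2, h3⟩
          have hnX : x ∉ X := by rw [hXnil]; exact List.not_mem_nil
          rw [hmemX] at hnX
          have : ¬ (x ≤ s + k) := by
            intro hc
            exact hnX ⟨(hY ▸ (mem_G ps (s+1) x).2 ⟨h1, h2, h3⟩), hc⟩
          exact ⟨h1, by omega, h3⟩
      rw [ih ps (s + k) (by omega) (by push_cast at hf ⊢; omega), hYk, hGs]
      cases hc : Y with
      | nil => rfl
      | cons q rest =>
        have hstep : bridgeRec k (s :: q :: rest) ps
            = bridgeRec k (q :: rest) (if q - s ≤ k then mark s q ps else ps) := rfl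
        rw [hstep]
        have hqY : q ∈ Y := by rw [hc]; exact List.mem_cons_self
        have hqnX : q ∉ X := by rw [hXnil]; exact List.not_mem_nil
        rw [hmemX] at hqnX
        have : ¬ (q - s ≤ k) := by
          intro hcc
          exact hqnX ⟨hqY, by omega⟩
        rw [if_neg this]
    case neg =>
      obtain ⟨u, L, huL⟩ : ∃ u L, X = u ++ [L] :=
        ⟨X.dropLast, X.getLast hXnil, (List.dropLast_append_getLast hXnil).symm⟩
      have hLX : L ∈ X := by rw [huL]; exact List.mem_append_right _ (List.mem_singleton_self L)
      have hXsorted : List.Pairwise (· < ·) X :=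
        (PySem.List.pairwise_lt_pyRange_one _ _).filter _
      have hLmem := (hmemX L).1 hLX
      have hLY := (mem_G ps (s + 1) L).1 (hY ▸ hLmem.1)
      have hgl : X.getLastD s = L := by rw [huL, getLastD_append_singleton]
      rw [hgl]
      show (if L - s > 0 then pvLoopA k fuel _ L else _) = _
      rw [if_pos (by omega), fill_eq_mark s ps hs L]
      have hlen : ((mark s L ps).length : Int) = n := by rw [length_mark]
      rw [ih (mark s L ps) L (by omega) (by rw [hlen]; push_cast at hf ⊢; omega)]
      set Z : List Int := Y.filter (fun x => decide (s + k < x)) with hZ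
      have hGmark : G (mark s L ps) L = L :: Z := by
        apply sorted_ext _ _ (G_sorted _ L)
        · apply List.Pairwise.cons
          · intro z hz
            rw [hZ, List.mem_filter] at hz
            have := hz.2
            simp at this
            omega
          · exact (G_sorted ps (s + 1)).filter _
        · intro x
          rw [mem_G, length_mark, List.mem_cons, hZ, List.mem_filter, hY, mem_G]
          constructor
          · rintro ⟨⟨h1, h2⟩, h3, h4⟩
            by_cases hxL : x = L
            · exact Or.inl hxL
            · rw [foreAt_mark s L x ps h1 h2] at h4
              rw [if_neg (by omega)] at h4
              right
              refine ⟨⟨⟨h1, h2⟩, by omega, h4⟩, ?_⟩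
              simp only [decide_eq_true_eq]
              by_contra hc
              push Not at hc
              have hxX : x ∈ X := (hmemX x).2 ⟨(hY ▸ (mem_G ps (s+1) x).2 ⟨⟨h1, h2⟩, by omega, h4⟩), hc⟩
              have := le_getLast_of_pairwise u L x (huL ▸ hxX) (huL ▸ hXsorted)
              omega
          · rintro (heq | ⟨⟨⟨h1, h2⟩, h3, h4⟩, h5⟩)
            · subst heq
              refine ⟨⟨by omega, hLY.1.2⟩, le_refl _, ?_⟩
              rw [foreAt_mark s x x ps (by omega) (by exact hLY.1.2)]
              rw [if_pos (by omega)]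
            · simp only [decide_eq_true_eq] at h5
              refine ⟨⟨h1, h2⟩, by omega, ?_⟩
              rw [foreAt_mark s L x ps h1 h2]
              rw [if_neg (by omega)]
              exact h4
      rw [hGmark, hGs]
      have hsplit : Y = X ++ Z := by
        have h1 : X = Y.filter (fun x => decide (x ≤ s + k)) := by
          apply sorted_ext _ _ hXsorted ((G_sorted ps (s + 1)).filter _)
          intro x
          rw [hmemX, List.mem_filter]
          simp only [decide_eq_true_eq]
          exact Iff.rfl
        rw [h1, hZ]
        exact sorted_split (s + k) Y (G_sorted ps (s + 1))
      rw [hsplit, huL]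
      have : (u ++ [L]) ++ Z = u ++ L :: Z := by simp
      rw [this]
      refine (bridge_chain k s L Z hLmem.2 u s ps (le_refl _) (by omega) ?hu ?hp).symm
      case hu =>
        intro x hx
        have hxL : x < L := (List.pairwise_append.1 (huL ▸ hXsorted)).2.2 x hx L (List.mem_singleton_self L)
        have hxmem := (hmemX x).1 (by rw [huL]; exact List.mem_append_left _ hx)
        have hxY := (mem_G ps (s + 1) x).1 (hY ▸ hxmem.1)
        exact ⟨by omega, hxL⟩
      case hp =>
        exact (List.pairwise_append.1 (huL ▸ hXsorted)).1

-- ===== VERDICT (by name: the statement is the Claim_ definition above) =====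
theorem foregroundClustering_spec : Claim_equal_foregroundClustering := by
  intro ps k _ hpre
  unfold Spec_foregroundClustering
  rw [alt_eq]
  show pvLoopA k (ps.length + 1) ps 0 = bridgeRec k (G ps 0) ps
  rcases hpre with ⟨_, hk | hnf⟩
  · exact pvLoopA_eq_bridgeRec k hk (ps.length + 1) ps 0 (le_refl 0) (by push_cast; omega)
  · rw [loopA_nofore k ps hnf (ps.length + 1) 0 (by push_cast; omega)]
    have hG : G ps 0 = [] := by
      rw [List.eq_nil_iff_forall_not_mem]
      intro x hx
      rw [mem_G, foreAt_false_of_nofore ps hnf x] at hx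
      simp at hx
    rw [hG]
    rfl
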